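-- pv_equiv track=rewrite | github.com/duaraghav8/dockershrink | experiments/ensure-prod-dependencies-only/ensure-prod-deps-only.py | get_final_stage_commands
-- ===== SOURCE A (Python) =====
-- def get_final_stage_commands(dockerfile_content):
--     """
--     Extracts the commands for the final stage of a multi-stage Dockerfile.
--
--     Parameters:
--         dockerfile_content (list): List of lines from the Dockerfile.
--
--     Returns:
--         list: Lines of commands related to the final stage.
--     """
--     stages = []
--     current_stage = []
--
--     for line in dockerfile_content:
--         # Detect new stages (indicated by the `FROM` keyword)
--         if line.strip().startswith("FROM"):
--             if current_stage:
--                 stages.append(current_stage)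
--             current_stage = [line]
--         else:
--             current_stage.append(line)
--
--     # Add the final stage
--     if current_stage:
--         stages.append(current_stage)
--
--     # Return the commands of the final stage only
--     return stages[-1] if stages else []
-- ===== SOURCE B (Python) =====
-- def get_final_stage_commands(dockerfile_content):
--     """Return the lines of the final stage of a multi-stage Dockerfile.
--
--     Instead of grouping the lines into stages, keep only the index of the
--     last line that starts a stage (a line whose stripped form starts with
--     "FROM") and return the suffix from that index.  If no line starts a
--     stage, the index stays 0 and the whole list is returned (a copy);
--     for empty input this is [].
--     """
--     last = 0
--     for i, line in enumerate(dockerfile_content):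
--         if line.strip().startswith("FROM"):
--             last = i
--     return dockerfile_content[last:]
-- ===== Notes on version B (the rewrite author's own statement) =====
-- stated objective: simpler
-- what changed: B keeps only the index of the last FROM line in one pass and returns the suffix from it, instead of building a list of all stages and taking the last one.
import Mathlib
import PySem

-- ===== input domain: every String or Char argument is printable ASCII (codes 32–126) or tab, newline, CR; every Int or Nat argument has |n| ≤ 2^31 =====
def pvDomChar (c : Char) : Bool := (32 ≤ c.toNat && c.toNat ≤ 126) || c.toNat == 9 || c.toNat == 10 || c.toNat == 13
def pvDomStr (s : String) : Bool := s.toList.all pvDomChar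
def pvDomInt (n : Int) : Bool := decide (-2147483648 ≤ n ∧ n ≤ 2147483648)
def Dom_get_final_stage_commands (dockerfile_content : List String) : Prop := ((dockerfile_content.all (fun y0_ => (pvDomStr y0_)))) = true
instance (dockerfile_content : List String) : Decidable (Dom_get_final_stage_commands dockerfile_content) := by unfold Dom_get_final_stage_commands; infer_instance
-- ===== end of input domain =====

-- B keeps only the index of the last FROM line (one pass) and returns the suffix
-- from it, instead of grouping every stage and taking the last group: simpler.

-- line.strip().startswith("FROM")
def pvIsFrom (l : String) : Bool := PySem.Str.startswith (PySem.Str.strip l) "FROM"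

-- ===== PORT A =====
def get_final_stage_commands (dockerfile_content : List String) : List String :=
  -- stages = []; current_stage = []; for line in dockerfile_content: …
  let st := dockerfile_content.foldl
    (fun (st : List (List String) × List String) line =>
      if pvIsFrom line then
        ((if st.2 ≠ [] then st.1 ++ [st.2] else st.1), [line])
      else
        (st.1, st.2 ++ [line]))
    ([], [])
  -- if current_stage: stages.append(current_stage)
  let stages := if st.2 ≠ [] then st.1 ++ [st.2] else st.1
  -- return stages[-1] if stages else []
  match stages.getLast? with
  | some s => s
  | none => []

-- ===== PORT B =====
def get_final_stage_commands_alt (dockerfile_content : List String) : List String :=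
  -- last = 0; for i, line in enumerate(…): if isFrom(line): last = i
  let last := (dockerfile_content.foldl
    (fun (acc : Nat × Nat) line => ((if pvIsFrom line then acc.2 else acc.1), acc.2 + 1))
    (0, 0)).1
  -- dockerfile_content[last:]  (last is a Nat index, 0 ≤ last ≤ len: slice = drop, exact)
  dockerfile_content.drop last

-- ===== PRECONDITION & SPEC =====
def Spec_get_final_stage_commands (dockerfile_content : List String) (out : List String) : Prop := out = get_final_stage_commands_alt dockerfile_content
instance (dockerfile_content : List String) (out : List String) : Decidable (Spec_get_final_stage_commands dockerfile_content out) := by unfold Spec_get_final_stage_commands; infer_instance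

-- ===== CLAIM (what is proved, stated in full; the proofs are below) =====
def Claim_equal_get_final_stage_commands : Prop := ∀ (dockerfile_content : List String), Dom_get_final_stage_commands dockerfile_content → Spec_get_final_stage_commands dockerfile_content (get_final_stage_commands dockerfile_content)

-- ===== LEMMAS AND PROOFS =====

-- index of the last FROM line, if any (recursive characterisation)
def pvLF : List String → Option Nat
  | [] => none
  | l :: r =>
    match pvLF r with
    | some j => some (j + 1)
    | none => if pvIsFrom l then some 0 else none

-- B's fold computes pvLF (shifted by the running index)
theorem b_fold_eq (ls : List String) : ∀ (last i : Nat),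
    (ls.foldl (fun (acc : Nat × Nat) line =>
      ((if pvIsFrom line then acc.2 else acc.1), acc.2 + 1)) (last, i)).1
    = match pvLF ls with | some j => i + j | none => last := by
  induction ls with
  | nil => intro last i; simp [pvLF]
  | cons l r ih =>
    intro last i
    simp only [List.foldl, pvLF]
    rw [ih]
    cases h : pvLF r with
    | some j => simp only [Nat.add_comm, Nat.add_left_comm]
    | none => by_cases hf : pvIsFrom l <;> simp [hf]

def pvFinalize (st : List (List String) × List String) : List String :=
  match (if st.2 ≠ [] then st.1 ++ [st.2] else st.1).getLast? with
  | some s => s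
  | none => []

-- A's fold, finalized, returns the suffix from the last FROM line (or the
-- accumulated lines if none)
theorem a_fold_eq (ls : List String) : ∀ (stages : List (List String)) (cur : List String),
    pvFinalize (ls.foldl
      (fun (st : List (List String) × List String) line =>
        if pvIsFrom line then
          ((if st.2 ≠ [] then st.1 ++ [st.2] else st.1), [line])
        else
          (st.1, st.2 ++ [line])) (stages, cur))
    = match pvLF ls with
      | some j => ls.drop j
      | none => if cur ++ ls ≠ [] then cur ++ ls else pvFinalize (stages, cur) := by
  induction ls with
  | nil =>
    intro stages cur
    simp only [List.foldl, pvLF, List.append_nil]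
    by_cases hc : cur = [] <;> simp [pvFinalize, hc]
  | cons l r ih =>
    intro stages cur
    simp only [List.foldl]
    by_cases hf : pvIsFrom l
    · simp only [hf, if_pos]
      rw [ih]
      cases h : pvLF r with
      | some j => simp [pvLF, h]
      | none => simp [pvLF, h, hf]
    · simp only [hf]
      rw [ih]
      cases h : pvLF r with
      | some j => simp [pvLF, h]
      | none =>
        simp only [pvLF, h, hf]
        have h1 : cur ++ [l] ++ r ≠ [] := by simp
        have h2 : cur ++ l :: r ≠ [] := by simp
        simp only [h2, if_pos, ne_eq, not_false_iff]
        simp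

-- ===== VERDICT (by name: the statement is the Claim_ definition above) =====
theorem get_final_stage_commands_spec : Claim_equal_get_final_stage_commands := by
  intro dc _
  show get_final_stage_commands dc = get_final_stage_commands_alt dc
  unfold get_final_stage_commands get_final_stage_commands_alt
  rw [show ([] : List (List String)) = Prod.fst (([],[]) : List (List String) × List String) from rfl]
  have ha := a_fold_eq dc [] []
  have hb := b_fold_eq dc 0 0
  simp only [pvFinalize] at ha
  rw [hb, ha]
  cases h : pvLF dc with
  | some j => simp
  | none => cases dc <;> simp
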